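-- pv_equiv track=rewrite | github.com/rgstr123/checkio | Electronic-Station/Weak Point.py | weak_point
-- ===== SOURCE A (Python) =====
-- def weak_point(matrix):
--
--     row_sum = []
--     column_sum =[]
--
--     # Записываем в списки суммы строк и столбцов
--     for x, y in zip(matrix, list(zip(*matrix))):    # zip(*matrix) переворачивает массив, zip(array1, array2) позволяет проходиться по ним одновременно
--         row_sum.append(sum(x))
--         column_sum.append(sum(y))
--
--     # Ищем инндекс минимального эллемента в отсортированном массиве
--     index_min_row = row_sum.index(sorted(row_sum)[0])
--     index_min_column = column_sum.index(sorted(column_sum)[0])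
--
--     return index_min_row, index_min_column
-- ===== SOURCE B (Python) =====
-- def weak_point(matrix):
--     min_row = min_col = None
--     at_row = at_col = 0
--     for i, (row, col) in enumerate(zip(matrix, zip(*matrix))):
--         r = sum(row)
--         if min_row is None or r < min_row:
--             min_row, at_row = r, i
--         c = sum(col)
--         if min_col is None or c < min_col:
--             min_col, at_col = c, i
--     return at_row, at_col
-- ===== Notes on version B (the rewrite author's own statement) =====
-- stated objective: simpler
-- what changed: B is one streaming pass keeping running (minimum, index) pairs for rows and columns with strict '<', building no sum lists and doing no sorting or list.index search; A materialises two sum lists, sorts each, and searches the sorted head's index.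
import Mathlib
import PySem

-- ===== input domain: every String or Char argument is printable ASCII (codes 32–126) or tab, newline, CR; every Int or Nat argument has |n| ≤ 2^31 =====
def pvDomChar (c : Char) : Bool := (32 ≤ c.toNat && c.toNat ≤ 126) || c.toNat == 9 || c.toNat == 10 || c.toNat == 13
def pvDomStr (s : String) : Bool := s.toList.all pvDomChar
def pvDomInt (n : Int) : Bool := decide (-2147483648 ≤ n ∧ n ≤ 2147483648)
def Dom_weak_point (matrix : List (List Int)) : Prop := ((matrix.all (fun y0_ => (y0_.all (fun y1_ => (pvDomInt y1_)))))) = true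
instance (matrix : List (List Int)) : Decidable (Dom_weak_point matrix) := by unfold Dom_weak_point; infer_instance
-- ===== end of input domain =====

-- B replaces A's two sum lists + sort + list.index by one streaming pass keeping running (minimum, index) pairs (simpler decomposition, same results on Pre_).


-- ===== PORT A =====
-- zip(*matrix): the list of columns, truncated to the shortest row (Python zip truncation).
def pvZipStar (rows : List (List Int)) : List (List Int) :=
  match rows with
  | [] => []
  | r0 :: rest =>
    let m := rest.foldl (fun a r => min a r.length) r0.length
    (List.range m).map (fun j => (r0 :: rest).map (fun r => r.getD j 0))

def weak_point (matrix : List (List Int)) : Int × Int :=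
  let pairs := matrix.zip (pvZipStar matrix)
  let row_sum := pairs.foldl (fun a p => a ++ [p.1.sum]) []
  let column_sum := pairs.foldl (fun a p => a ++ [p.2.sum]) []
  -- sorted(row_sum)[0] raises IndexError on an empty list; that case is excluded by Pre_ (getD 0 is never read inside Pre_)
  let index_min_row := (PySem.List.index? row_sum ((PySem.List.pyGet? (PySem.List.sorted row_sum (fun x => x) false) 0).getD 0)).getD 0
  let index_min_column := (PySem.List.index? column_sum ((PySem.List.pyGet? (PySem.List.sorted column_sum (fun x => x) false) 0).getD 0)).getD 0
  ((index_min_row : Int), (index_min_column : Int))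

-- ===== PORT B =====
-- 'if best is None or v < best: best, at = v, i' — one update of a running (minimum, index) pair
def pvStep (best : Option Int × Int) (i : Int) (v : Int) : Option Int × Int :=
  match best.1 with
  | none => (some v, i)
  | some m => if v < m then (some v, i) else best

def weak_point_alt (matrix : List (List Int)) : Int × Int :=
  let st := (PySem.List.enumerate (matrix.zip (pvZipStar matrix))).foldl
    (fun (s : (Option Int × Int) × (Option Int × Int)) p =>
      (pvStep s.1 p.1 p.2.1.sum, pvStep s.2 p.1 p.2.2.sum))
    ((none, 0), (none, 0))
  (st.1.2, st.2.2)

-- ===== PRECONDITION & SPEC =====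
-- Pre_ excludes exactly the inputs where A raises IndexError: the empty matrix and matrices with an empty row
-- (there zip truncation leaves row_sum/column_sum empty and sorted(...)[0] raises).
def Pre_weak_point (matrix : List (List Int)) : Prop := matrix ≠ [] ∧ ∀ r ∈ matrix, r ≠ []
instance (matrix : List (List Int)) : Decidable (Pre_weak_point matrix) := by unfold Pre_weak_point; infer_instance
def pvWitness_weak_point : List (List Int) := [[1, 2], [3, 4]]

def Spec_weak_point (matrix : List (List Int)) (out : Int × Int) : Prop := out = weak_point_alt matrix
instance (matrix : List (List Int)) (out : Int × Int) : Decidable (Spec_weak_point matrix out) := by unfold Spec_weak_point; infer_instance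

-- ===== CLAIM (what is proved, stated in full; the proofs are below) =====
def Claim_equal_weak_point : Prop := ∀ (matrix : List (List Int)), Dom_weak_point matrix → Pre_weak_point matrix → Spec_weak_point matrix (weak_point matrix)

-- ===== LEMMAS AND PROOFS =====

-- "first index of the minimum" characterisation shared by both ports
def FA (l : List Int) (r : Nat) : Prop :=
  r < l.length ∧ (∀ j, j < l.length → l.getD r 0 ≤ l.getD j 0) ∧ (∀ j, j < r → l.getD r 0 < l.getD j 0)

theorem FA_unique (l : List Int) (r1 r2 : Nat) (h1 : FA l r1) (h2 : FA l r2) : r1 = r2 := by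
  obtain ⟨hl1, hm1, hs1⟩ := h1
  obtain ⟨hl2, hm2, hs2⟩ := h2
  rcases Nat.lt_trichotomy r1 r2 with h | h | h
  · exact absurd (hm1 r2 hl2) (by simpa using hs2 r1 h)
  · exact h
  · exact absurd (hm2 r1 hl1) (by simpa using hs1 r2 h)

-- A's sorted-then-index pass is the first index of the minimum
theorem A_FA (l : List Int) (h : l ≠ []) :
    FA l ((PySem.List.index? l ((PySem.List.pyGet? (PySem.List.sorted l (fun x => x) false) 0).getD 0)).getD 0) := by
  rcases hs : PySem.List.sorted l (fun x => x) false with _ | ⟨m, t⟩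
  · exact absurd ((PySem.List.sorted_eq_nil_iff _ _ _).mp hs) h
  have hget : (PySem.List.pyGet? (m :: t) (0 : Int)).getD 0 = m := by
    have : ((0 : Nat) : Int) = (0 : Int) := rfl
    rw [← this, PySem.List.pyGet?_natCast]
    rfl
  rw [hget]
  have hmin : ∀ y ∈ l, m ≤ y := by
    have := PySem.List.key_head_sorted_le l (fun x => x) hs
    simpa using this
  have hmem : m ∈ l := by
    have : m ∈ PySem.List.sorted l (fun x => x) false := by rw [hs]; exact List.mem_cons_self
    rwa [PySem.List.mem_sorted] at this
  obtain ⟨r, hr⟩ := Option.isSome_iff_exists.mp ((PySem.List.index?_isSome_iff l m).mpr hmem)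
  obtain ⟨hk, hrm, hbefore⟩ := PySem.List.getElem_of_index?_eq_some hr
  rw [hr]
  simp only [Option.getD_some]
  refine ⟨hk, ?_, ?_⟩
  · intro j hj
    rw [List.getD_eq_getElem l 0 hk, List.getD_eq_getElem l 0 hj, hrm]
    exact hmin _ (List.getElem_mem hj)
  · intro j hj
    have hjl : j < l.length := by omega
    rw [List.getD_eq_getElem l 0 hk, List.getD_eq_getElem l 0 hjl, hrm]
    exact lt_of_le_of_ne (hmin _ (List.getElem_mem _)) (Ne.symm (hbefore j hj))

-- a fold whose state is a pair updated componentwise splits into two folds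
theorem prod_foldl {α β γ : Type} (f : α → γ → α) (g : β → γ → β) :
    ∀ (l : List γ) (a : α) (b : β),
      l.foldl (fun s p => (f s.1 p, g s.2 p)) (a, b) = (l.foldl f a, l.foldl g b) := by
  intro l
  induction l with
  | nil => intro a b; rfl
  | cons x xs ih => intro a b; simp [ih]

theorem enumerate_map {α β : Type} (F : α → β) :
    ∀ (l : List α) (s : Int),
      PySem.List.enumerate (l.map F) s = (PySem.List.enumerate l s).map (fun p => (p.1, F p.2)) := by
  intro l
  induction l with
  | nil => intro s; simp [PySem.List.enumerate_nil]
  | cons x xs ih => intro s; simp [PySem.List.enumerate_cons, ih]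

-- invariant of the running-minimum fold over the enumerated suffix
theorem stepfold_inv (vs : List Int) (t : Nat) : ∀ (s b : Nat), s + t = vs.length → b < s →
    (∀ j, j < s → vs.getD b 0 ≤ vs.getD j 0) → (∀ j, j < b → vs.getD b 0 < vs.getD j 0) →
    ∃ r : Nat, (PySem.List.enumerate (vs.drop s) (s : Int)).foldl
        (fun st p => pvStep st p.1 p.2) (some (vs.getD b 0), (b : Int))
      = (some (vs.getD r 0), (r : Int)) ∧ FA vs r := by
  induction t with
  | zero =>
    intro s b hst hbs hmin hstrict
    have hdrop : vs.drop s = [] := List.drop_eq_nil_of_le (by omega)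
    rw [hdrop, PySem.List.enumerate_nil, List.foldl_nil]
    exact ⟨b, rfl, by omega, fun j hj => hmin j (by omega), hstrict⟩
  | succ t ih =>
    intro s b hst hbs hmin hstrict
    have hs : s < vs.length := by omega
    rw [List.drop_eq_getElem_cons hs, PySem.List.enumerate_cons, List.foldl_cons]
    have hcast : (s : Int) + 1 = ((s + 1 : Nat) : Int) := by push_cast; ring
    have hval : vs[s] = vs.getD s 0 := (List.getD_eq_getElem vs 0 hs).symm
    have hred : pvStep (some (vs.getD b 0), (b : Int)) (s : Int) vs[s]
        = if vs[s] < vs.getD b 0 then (some vs[s], (s : Int)) else (some (vs.getD b 0), (b : Int)) := rfl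
    by_cases hc : vs[s] < vs.getD b 0
    · have hc' : vs.getD s 0 < vs.getD b 0 := by rw [hval] at hc; exact hc
      rw [hred, if_pos hc, hval, hcast]
      exact ih (s + 1) s (by omega) (by omega)
        (fun j hj => by
          rcases Nat.lt_or_ge j s with h | h
          · exact le_of_lt (lt_of_lt_of_le hc' (hmin j h))
          · have : j = s := by omega
            rw [this]
        )
        (fun j hj => lt_of_lt_of_le hc' (hmin j hj))
    · have hc' : ¬ vs.getD s 0 < vs.getD b 0 := by rw [hval] at hc; exact hc
      rw [hred, if_neg hc, hcast]
      exact ih (s + 1) b (by omega) (by omega)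
        (fun j hj => by
          rcases Nat.lt_or_ge j s with h | h
          · exact hmin j h
          · have : j = s := by omega
            rw [this]
            omega)
        hstrict

-- the whole streaming fold, started from None, lands on the first index of the minimum
theorem stepfold_FA (vs : List Int) (h : vs ≠ []) :
    ∃ r : Nat, (PySem.List.enumerate vs 0).foldl (fun st p => pvStep st p.1 p.2) (none, 0)
      = (some (vs.getD r 0), (r : Int)) ∧ FA vs r := by
  rcases vs with _ | ⟨v, tail⟩
  · exact absurd rfl h
  rw [PySem.List.enumerate_cons, List.foldl_cons]
  have hstep : pvStep ((none : Option Int), (0 : Int)) 0 v = (some v, 0) := rfl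
  have h1 : ((0 : Int) + 1) = ((1 : Nat) : Int) := by norm_num
  rw [hstep, h1]
  exact stepfold_inv (v :: tail) tail.length 1 0
    (by simp only [List.length_cons]; omega) (by omega)
    (fun j hj => by
      have hj0 : j = 0 := by omega
      rw [hj0])
    (fun j hj => absurd hj (by omega))

theorem foldl_min_pos (rest : List (List Int)) : ∀ (a : Nat), 1 ≤ a → (∀ r ∈ rest, r ≠ []) →
    1 ≤ rest.foldl (fun a r => min a r.length) a := by
  induction rest with
  | nil => intro a ha _; simpa using ha
  | cons r rs ih =>
    intro a ha hne
    rw [List.foldl_cons]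
    refine ih _ ?_ (fun x hx => hne x (List.mem_cons_of_mem r hx))
    have : r ≠ [] := hne r List.mem_cons_self
    have : 1 ≤ r.length := List.length_pos_of_ne_nil this
    omega

theorem FA_cast_eq (l : List Int) (r1 r2 : Nat) (h1 : FA l r1) (h2 : FA l r2) :
    ((r1 : Nat) : Int) = ((r2 : Nat) : Int) := by
  exact congrArg _ (FA_unique l r1 r2 h1 h2)

-- ===== VERDICT (by name: the statement is the Claim_ definition above) =====
theorem weak_point_spec : Claim_equal_weak_point := by
  intro matrix hdom hpre
  obtain ⟨hne, hrows⟩ := hpre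
  unfold Spec_weak_point
  -- the shared list of (row, column) pairs is nonempty under Pre_
  have hp : matrix.zip (pvZipStar matrix) ≠ [] := by
    cases matrix with
    | nil => exact absurd rfl hne
    | cons r0 rest =>
      apply List.ne_nil_of_length_pos
      rw [List.length_zip]
      have hm : 1 ≤ rest.foldl (fun a r => min a r.length) r0.length := by
        refine foldl_min_pos rest r0.length ?_ (fun r hr => hrows r (List.mem_cons_of_mem r0 hr))
        exact List.length_pos_of_ne_nil (hrows r0 List.mem_cons_self)
      simp only [pvZipStar, List.length_cons, List.length_map, List.length_range]
      omega
  set pairs := matrix.zip (pvZipStar matrix) with hpairs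
  have hms : pairs.map (fun p => p.1.sum) ≠ [] := by
    intro hc; exact hp (List.map_eq_nil_iff.mp hc)
  have hcs : pairs.map (fun p => p.2.sum) ≠ [] := by
    intro hc; exact hp (List.map_eq_nil_iff.mp hc)
  -- B's fold splits into two streaming argmin folds over the same sum lists A builds
  obtain ⟨rB, hrB, hFArB⟩ := stepfold_FA (pairs.map (fun p => p.1.sum)) hms
  obtain ⟨cB, hcB, hFAcB⟩ := stepfold_FA (pairs.map (fun p => p.2.sum)) hcs
  simp only [enumerate_map, List.foldl_map] at hrB hcB
  have hB : weak_point_alt matrix =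
      (((PySem.List.enumerate pairs 0).foldl (fun a p => pvStep a p.1 p.2.1.sum) (none, 0)).2,
       ((PySem.List.enumerate pairs 0).foldl (fun a p => pvStep a p.1 p.2.2.sum) (none, 0)).2) := by
    simp only [weak_point_alt, ← hpairs]
    rw [prod_foldl (fun (a : Option Int × Int) (p : Int × (List Int × List Int)) => pvStep a p.1 p.2.1.sum)
        (fun (a : Option Int × Int) (p : Int × (List Int × List Int)) => pvStep a p.1 p.2.2.sum)]
  simp only [weak_point, ← hpairs, PySem.List.foldl_append_singleton_eq_map, List.nil_append,
    hB, hrB, hcB]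
  exact Prod.ext
    (FA_cast_eq _ _ _ (A_FA _ hms) hFArB)
    (FA_cast_eq _ _ _ (A_FA _ hcs) hFAcB)
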